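-- pv_equiv track=rewrite | github.com/shikaruki/Hactoberfest2021 | gui_1_atten.py | creat_lst
-- ===== SOURCE A (Python) =====
-- def creat_lst(info):
--     my_lst=[]
--     dic={}
--     for line in info:
--         for i in line:
--             if i=="_":
--                 tmp=""
--                 enr=""
--                 count=0
--                 for j in line:
--                     if j!="_":
--                         tmp+=j
--                         count+=1
--                     else:
--                         count+=1
--                         while count < len(line):
--                             enr+=line[count]
--                             count+=1
--                         dic[tmp]=enr
--
--     return dic
-- ===== SOURCE B (Python) =====
-- def creat_lst(info):
--     dic = {}
--     for line in info:
--         p = line.find("_")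
--         if p != -1:
--             suffix = line[p + 1:]
--             acc = ""
--             for ch in line:
--                 if ch == "_":
--                     dic[acc] = suffix
--                 else:
--                     acc += ch
--     return dic
-- ===== Notes on version B (the rewrite author's own statement) =====
-- stated objective: simpler
-- what changed: B computes the suffix after the first underscore once (find + slice) and makes a single linear scan per line inserting each accumulated non-underscore prefix, instead of A's triply nested loops that re-parse the whole line (rebuilding the suffix with an inner while) at every underscore encountered.
import Mathlib
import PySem

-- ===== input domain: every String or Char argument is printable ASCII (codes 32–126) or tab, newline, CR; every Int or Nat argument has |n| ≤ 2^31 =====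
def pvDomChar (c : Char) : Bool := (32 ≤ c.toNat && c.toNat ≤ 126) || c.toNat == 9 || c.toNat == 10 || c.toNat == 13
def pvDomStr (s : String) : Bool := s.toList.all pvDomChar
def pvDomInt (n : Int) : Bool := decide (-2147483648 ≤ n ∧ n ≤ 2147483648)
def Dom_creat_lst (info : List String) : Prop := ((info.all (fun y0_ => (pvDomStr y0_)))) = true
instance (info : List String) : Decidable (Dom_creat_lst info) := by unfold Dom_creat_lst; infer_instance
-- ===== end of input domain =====

-- B replaces A's re-parse of the whole line at every underscore by one find/slice for the suffix
-- plus a single linear scan inserting each accumulated prefix; return values are equal.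

-- ===== PORT A =====
-- the inner 'while count < len(line): enr += line[count]; count += 1'
def pvWhileA (l : List Char) (count : Nat) (enr : List Char) : List Char × Nat :=
  if h : count < l.length then pvWhileA l (count + 1) (enr ++ [l[count]]) else (enr, count)
termination_by l.length - count

-- the inner 'for j in line' loop (state tmp, enr, count, dic)
def pvInnerA (l : List Char) : List Char → List Char → List Char → Nat → PySem.Dict String String → PySem.Dict String String
  | [], _, _, _, dic => dic
  | j :: rs, tmp, enr, count, dic =>
    if j ≠ '_' then
      pvInnerA l rs (tmp ++ [j]) enr (count + 1) dic
    else
      let r := pvWhileA l (count + 1) enr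
      pvInnerA l rs tmp r.1 r.2 (dic.insert (String.ofList tmp) (String.ofList r.1))

-- the 'for i in line' loop
def pvLineA (l : List Char) : List Char → PySem.Dict String String → PySem.Dict String String
  | [], dic => dic
  | i :: rs, dic => pvLineA l rs (if i = '_' then pvInnerA l l [] [] 0 dic else dic)

def creat_lst (info : List String) : List (String × String) :=
  (info.foldl (fun dic line => pvLineA line.toList line.toList dic) PySem.Dict.empty).items

-- ===== PORT B =====
-- B's 'for ch in line' loop (state acc, dic)
def pvLineB (suffix : String) : List Char → List Char → PySem.Dict String String → PySem.Dict String String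
  | [], _, dic => dic
  | ch :: rs, acc, dic =>
    if ch = '_' then pvLineB suffix rs acc (dic.insert (String.ofList acc) suffix)
    else pvLineB suffix rs (acc ++ [ch]) dic

def creat_lst_alt (info : List String) : List (String × String) :=
  (info.foldl (fun dic line =>
    let p := PySem.Str.find line "_"
    if p ≠ -1 then
      let suffix := PySem.Str.slice line (some (p + 1)) none
      pvLineB suffix line.toList [] dic
    else dic) PySem.Dict.empty).items

-- ===== PRECONDITION & SPEC =====
def Spec_creat_lst (info : List String) (out : List (String × String)) : Prop := out = creat_lst_alt info
instance (info : List String) (out : List (String × String)) : Decidable (Spec_creat_lst info out) := by unfold Spec_creat_lst; infer_instance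

-- ===== CLAIM (what is proved, stated in full; the proofs are below) =====
def Claim_equal_creat_lst : Prop := ∀ (info : List String), Dom_creat_lst info → Spec_creat_lst info (creat_lst info)

-- ===== LEMMAS AND PROOFS =====
-- the while loop consumes the rest of the line
theorem pvWhileA_eq (l : List Char) (count : Nat) (enr : List Char) :
    pvWhileA l count enr = (enr ++ l.drop count, max count l.length) := by
  fun_induction pvWhileA l count enr with
  | case1 count enr h ih =>
    rw [ih]
    have : l.drop count = l[count] :: l.drop (count + 1) := List.drop_eq_getElem_cons h
    rw [this]
    simp
    omega
  | case2 count enr h =>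
    have : l.drop count = [] := List.drop_eq_nil_of_le (by omega)
    simp [this]
    omega

def insAll (s : String) (ks : List String) (d : PySem.Dict String String) : PySem.Dict String String :=
  ks.foldl (fun d k => d.insert k s) d

def keysB : List Char → List Char → List String
  | [], _ => []
  | ch :: rs, acc => if ch = '_' then String.ofList acc :: keysB rs acc else keysB rs (acc ++ [ch])

theorem pvLineB_eq_insAll (s : String) (rest : List Char) :
    ∀ (acc : List Char) (d : PySem.Dict String String),
      pvLineB s rest acc d = insAll s (keysB rest acc) d := by
  induction rest with
  | nil => intro acc d; simp [pvLineB, keysB, insAll]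
  | cons ch rs ih =>
    intro acc d
    by_cases h : ch = '_' <;> simp [pvLineB, keysB, h, ih, insAll]

theorem get?_insAll (s : String) (ks : List String) :
    ∀ (d : PySem.Dict String String) (k : String),
      (insAll s ks d).get? k = if k ∈ ks then some s else d.get? k := by
  induction ks with
  | nil => intro d k; simp [insAll]
  | cons k' ks ih =>
    intro d k
    show (insAll s ks (d.insert k' s)).get? k = _
    rw [ih]
    rw [PySem.Dict.get?_insert]
    by_cases h : k = k' <;> by_cases h2 : k ∈ ks <;> simp [h, h2]

theorem nodup_insAll (s : String) (ks : List String) (d : PySem.Dict String String)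
    (h : d.keys.Nodup) : (insAll s ks d).keys.Nodup :=
  PySem.Dict.nodup_keys_foldl_insert ks (fun _ _ => s) d h

theorem insert_self_of_get? (d : PySem.Dict String String) (k v : String)
    (hn : d.keys.Nodup) (h : d.get? k = some v) : d.insert k v = d := by
  apply PySem.Dict.ext
  have hc : d.contains k = true := by rw [PySem.Dict.contains_eq_isSome_get?, h]; rfl
  rw [PySem.Dict.items_insert_of_contains d v hc]
  have : ∀ p ∈ d.items, (if p.1 == k then (k, v) else p) = p := by
    intro p hp
    by_cases hk : p.1 = k
    · have hm : (p.1, p.2) ∈ d.items := by simpa using hp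
      have := PySem.Dict.get?_of_mem_items d hm hn
      rw [hk, h] at this
      simp only [hk, beq_self_eq_true, if_true]
      cases p; simp at hk this ⊢; exact ⟨hk.symm, this⟩
    · simp [hk]
  rw [List.map_congr_left this]; simp

theorem insAll_fixed (s : String) (ks : List String) :
    ∀ (d : PySem.Dict String String), d.keys.Nodup → (∀ k ∈ ks, d.get? k = some s) →
      insAll s ks d = d := by
  induction ks with
  | nil => intro d _ _; rfl
  | cons k ks ih =>
    intro d hn hall
    show insAll s ks (d.insert k s) = d
    rw [insert_self_of_get? d k s hn (hall k (by simp))]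
    exact ih d hn (fun k hk => hall k (by simp [hk]))

theorem pvLineB_idem (s : String) (l : List Char) (d : PySem.Dict String String)
    (hn : d.keys.Nodup) : pvLineB s l [] (pvLineB s l [] d) = pvLineB s l [] d := by
  rw [pvLineB_eq_insAll, pvLineB_eq_insAll]
  apply insAll_fixed
  · exact nodup_insAll _ _ _ hn
  · intro k hk
    rw [get?_insAll]
    simp [hk]

def suffAfter : List Char → List Char
  | [] => []
  | c :: cs => if c = '_' then cs else suffAfter cs

-- after the first underscore has been consumed (count ≥ len), A's inner loop is B's scan with the fixed suffix
theorem pvInnerA_phase2 (l : List Char) (rest : List Char) :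
    ∀ (tmp enr : List Char) (count : Nat) (dic : PySem.Dict String String),
      l.length ≤ count →
      pvInnerA l rest tmp enr count dic = pvLineB (String.ofList enr) rest tmp dic := by
  induction rest with
  | nil => intro tmp enr count dic h; rfl
  | cons j rs ih =>
    intro tmp enr count dic h
    by_cases hj : j = '_'
    · subst hj
      show (if '_' ≠ '_' then _ else _) = _
      rw [if_neg (by simp)]
      have hw : pvWhileA l (count + 1) enr = (enr, count + 1) := by
        rw [pvWhileA_eq]
        have : l.drop (count + 1) = [] := List.drop_eq_nil_of_le (by omega)
        simp [this]; omega
      simp only [hw]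
      rw [ih tmp enr (count + 1) _ (by omega)]
      simp [pvLineB]
    · show (if j ≠ '_' then _ else _) = _
      rw [if_pos (by simp [hj])]
      rw [ih (tmp ++ [j]) enr (count + 1) dic (by omega)]
      simp [pvLineB, hj]

-- before the first underscore, A's inner loop on 'pre ++ rest' (pre already consumed, no '_' in pre)
-- is B's scan with suffix 'suffAfter rest'
theorem pvInnerA_phase1 (rest : List Char) :
    ∀ (pre tmp : List Char) (dic : PySem.Dict String String), '_' ∉ pre →
      pvInnerA (pre ++ rest) rest tmp [] pre.length dic
        = pvLineB (String.ofList (suffAfter rest)) rest tmp dic := by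
  induction rest with
  | nil => intro pre tmp dic hpre; rfl
  | cons j rs ih =>
    intro pre tmp dic hpre
    by_cases hj : j = '_'
    · subst hj
      show (if '_' ≠ '_' then _ else _) = _
      rw [if_neg (by simp)]
      have hw : pvWhileA (pre ++ '_' :: rs) (pre.length + 1) []
          = (rs, pre.length + 1 + rs.length) := by
        rw [pvWhileA_eq]
        have hd : (pre ++ '_' :: rs).drop (pre.length + 1) = rs := by
          rw [show pre.length + 1 = (pre ++ ['_']).length by simp]
          rw [show pre ++ '_' :: rs = (pre ++ ['_']) ++ rs by simp]
          exact List.drop_left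
        rw [hd]
        simp
        omega
      simp only [hw]
      rw [pvInnerA_phase2 _ _ _ _ _ _ (by simp; omega)]
      simp [pvLineB, suffAfter]
    · show (if j ≠ '_' then _ else _) = _
      rw [if_pos (by simp [hj])]
      have h1 : pre ++ j :: rs = (pre ++ [j]) ++ rs := by simp
      have h2 : pre.length + 1 = (pre ++ [j]).length := by simp
      rw [h1, h2, ih (pre ++ [j]) (tmp ++ [j]) dic (by simp [hpre]; exact fun h => hj h.symm)]
      simp [pvLineB, hj, suffAfter]

theorem parse_eq (l : List Char) (dic : PySem.Dict String String) :
    pvInnerA l l [] [] 0 dic = pvLineB (String.ofList (suffAfter l)) l [] dic := by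
  have := pvInnerA_phase1 l [] [] dic (by simp)
  simpa using this

theorem nodup_pvLineB (s : String) (l acc : List Char) (d : PySem.Dict String String)
    (hn : d.keys.Nodup) : (pvLineB s l acc d).keys.Nodup := by
  rw [pvLineB_eq_insAll]; exact nodup_insAll _ _ _ hn

-- A's outer 'for i in line' loop: the first underscore parses the line, later ones change nothing
theorem pvLineA_eq (l : List Char) (rest : List Char) :
    ∀ (dic : PySem.Dict String String), dic.keys.Nodup →
      pvLineA l rest dic
        = if '_' ∈ rest then pvLineB (String.ofList (suffAfter l)) l [] dic else dic := by
  induction rest with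
  | nil => intro dic hn; simp [pvLineA]
  | cons i rs ih =>
    intro dic hn
    by_cases hi : i = '_'
    · subst hi
      show pvLineA l rs (if ('_' : Char) = '_' then pvInnerA l l [] [] 0 dic else dic) = _
      rw [if_pos rfl, parse_eq]
      rw [ih _ (nodup_pvLineB _ _ _ _ hn)]
      by_cases hm : '_' ∈ rs
      · simp [hm, pvLineB_idem _ _ _ hn]
      · simp [hm]
    · show pvLineA l rs (if i = '_' then pvInnerA l l [] [] 0 dic else dic) = _
      rw [if_neg hi, ih _ hn]
      have : ¬ ('_' : Char) = i := fun h => hi h.symm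
      simp [this]

theorem suffAfter_drop (l : List Char) :
    ∀ n : Nat, (∀ i < n, l[i]? ≠ some '_') → l[n]? = some '_' → suffAfter l = l.drop (n + 1) := by
  induction l with
  | nil => intro n _ h; simp at h
  | cons c cs ih =>
    intro n hmin hn
    cases n with
    | zero => simp at hn; simp [suffAfter, hn]
    | succ m =>
      have hc : c ≠ '_' := by
        have := hmin 0 (by omega)
        simpa using this
      have : suffAfter cs = cs.drop (m + 1) := by
        apply ih m
        · intro i hi
          have := hmin (i + 1) (by omega)
          simpa using this
        · simpa using hn
      simp [suffAfter, hc, this]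

theorem find_spec (line : String) (h : ¬ PySem.Str.find line "_" = -1) :
    0 ≤ PySem.Str.find line "_" ∧
      line.toList[(PySem.Str.find line "_").toNat]? = some '_' ∧
      ∀ i < (PySem.Str.find line "_").toNat, line.toList[i]? ≠ some '_' := by
  have hb : PySem.Str.find line "_" = PySem.Chars.findFrom line.toList ['_'] 0 := by
    rw [PySem.Str.find_eq, PySem.Chars.findFrom_zero]; rfl
  have hs := PySem.Chars.findFrom_natCast_spec line.toList ['_'] 0 (by omega)
    (by rw [show ((0 : Nat) : Int) = 0 by rfl, ← hb]; exact h)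
  rw [show ((0 : Nat) : Int) = 0 by rfl, ← hb] at hs
  obtain ⟨h0, hpre, hmin⟩ := hs
  refine ⟨by exact_mod_cast h0, ?_, ?_⟩
  · obtain ⟨t, ht⟩ := hpre
    have : (line.toList.drop (PySem.Str.find line "_").toNat)[0]? = some '_' := by
      rw [← ht]; rfl
    rw [List.getElem?_drop] at this
    simpa using this
  · intro i hi hc
    apply hmin i (by omega) hi
    have hlen : i < line.toList.length := by
      have := List.getElem?_eq_some_iff.mp hc
      exact this.1
    rw [List.drop_eq_getElem_cons hlen]
    have : line.toList[i] = '_' := by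
      have := List.getElem?_eq_some_iff.mp hc
      obtain ⟨_, hv⟩ := this; exact hv
    rw [this]
    exact ⟨_, rfl⟩

-- the processing of one line agrees between the two programs
theorem line_eq (line : String) (d : PySem.Dict String String) (hn : d.keys.Nodup) :
    pvLineA line.toList line.toList d
      = (let p := PySem.Str.find line "_"
         if p ≠ -1 then
           let suffix := PySem.Str.slice line (some (p + 1)) none
           pvLineB suffix line.toList [] d
         else d) := by
  rw [pvLineA_eq _ _ _ hn]
  by_cases hp : PySem.Str.find line "_" = -1
  · have hmem : '_' ∉ line.toList := by
      have := (PySem.Str.find_eq_neg_one_iff line "_").mp hp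
      rw [show ("_" : String).toList = ['_'] from rfl] at this
      rw [← List.singleton_infix_iff]
      exact this
    have hp' : PySem.Chars.find line.toList ['_'] = -1 := by
      rw [show (['_'] : List Char) = ("_" : String).toList from rfl, ← PySem.Str.find_eq]
      exact hp
    simp [hmem, hp']
  · obtain ⟨h0, hat, hmin⟩ := find_spec line hp
    have hmem : '_' ∈ line.toList := by
      have hin := (PySem.Str.find_ne_neg_one_iff line "_").mp hp
      rw [show ("_" : String).toList = ['_'] from rfl] at hin
      exact (List.singleton_infix_iff _ _).mp hin
    have hsuf : String.ofList (suffAfter line.toList)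
        = PySem.Str.slice line (some (PySem.Str.find line "_" + 1)) none := by
      have h1 : (PySem.Str.slice line (some (PySem.Str.find line "_" + 1)) none).toList
          = line.toList.drop ((PySem.Str.find line "_").toNat + 1) := by
        rw [PySem.Str.toList_slice, PySem.Chars.slice_eq_listSlice,
          PySem.List.slice_from line.toList (by omega)]
        congr 1
        omega
      have h2 : suffAfter line.toList
          = line.toList.drop ((PySem.Str.find line "_").toNat + 1) :=
        suffAfter_drop _ _ hmin hat
      rw [h2, ← h1, String.ofList_toList]
    simp only [hp, hmem, if_true, ite_not, if_false, hsuf]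

theorem foldl_eq (info : List String) :
    ∀ (d : PySem.Dict String String), d.keys.Nodup →
      info.foldl (fun dic line => pvLineA line.toList line.toList dic) d
        = info.foldl (fun dic line =>
            let p := PySem.Str.find line "_"
            if p ≠ -1 then
              let suffix := PySem.Str.slice line (some (p + 1)) none
              pvLineB suffix line.toList [] dic
            else dic) d := by
  induction info with
  | nil => intro d _; rfl
  | cons line rest ih =>
    intro d hn
    simp only [List.foldl_cons]
    rw [line_eq line d hn]
    apply ih
    by_cases hp : PySem.Str.find line "_" = -1
    · have hp' : PySem.Chars.find line.toList ['_'] = -1 := by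
        rw [show (['_'] : List Char) = ("_" : String).toList from rfl, ← PySem.Str.find_eq]
        exact hp
      simpa [hp'] using hn
    · simp only [hp, ite_not, if_false]
      exact nodup_pvLineB _ _ _ _ hn

-- ===== VERDICT (by name: the statement is the Claim_ definition above) =====
theorem creat_lst_spec : Claim_equal_creat_lst := by
  intro info _
  show creat_lst info = creat_lst_alt info
  unfold creat_lst creat_lst_alt
  rw [foldl_eq info PySem.Dict.empty (by exact PySem.Dict.nodup_keys_empty)]
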